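-- pv_equiv track=rewrite | github.com/schspa/script | get-feishu-table.py | column_number_to_name
-- ===== SOURCE A (Python) =====
-- def column_number_to_name(column_number):
--     if column_number <= 0:
--         raise ValueError("Column number should be greater than 0")
--
--     column_name = ""
--     while column_number > 0:
--         remainder = (column_number - 1) % 26  # 0 to 25 for A to Z
--         column_name = chr(65 + remainder) + column_name
--         column_number = (column_number - 1) // 26  # Integer division for next digit
--
--     return column_name
-- ===== SOURCE B (Python) =====
-- def column_number_to_name(column_number):
--     if column_number <= 0:
--         raise ValueError("Column number should be greater than 0")
--     q, r = divmod(column_number - 1, 26)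
--     return (column_number_to_name(q) if q > 0 else '') + chr(65 + r)
-- ===== Notes on version B (the rewrite author's own statement) =====
-- stated objective: simpler
-- what changed: Replaced the while-loop with a string-prepend accumulator by a direct recursion that peels the least-significant base-26 digit via divmod and appends its letter after the recursive call.
import Mathlib
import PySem

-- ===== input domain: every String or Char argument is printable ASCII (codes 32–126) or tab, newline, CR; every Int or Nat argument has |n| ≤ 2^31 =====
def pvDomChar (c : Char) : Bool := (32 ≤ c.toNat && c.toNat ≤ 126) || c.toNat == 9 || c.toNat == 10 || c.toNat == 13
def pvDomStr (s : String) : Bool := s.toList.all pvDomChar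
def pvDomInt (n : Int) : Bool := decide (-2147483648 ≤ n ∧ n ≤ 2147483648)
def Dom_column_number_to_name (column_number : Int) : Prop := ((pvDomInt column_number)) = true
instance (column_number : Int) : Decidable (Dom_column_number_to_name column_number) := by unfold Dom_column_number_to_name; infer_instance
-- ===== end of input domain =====

-- B replaces A's while-loop with prepend accumulator by a recursion peeling the low base-26 digit (objective: simpler).
-- ===== PORT A =====
-- the while-loop of A: state = (column_number, column_name)
def cnLoop (column_number : Int) (column_name : String) : String :=
  if h : column_number > 0 then
    let remainder := PySem.Int.mod (column_number - 1) 26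
    cnLoop (PySem.Int.floordiv (column_number - 1) 26)
      (String.ofList (Char.ofNat (65 + remainder).toNat :: column_name.toList))
  else column_name
termination_by column_number.toNat
decreasing_by
  have h1 : PySem.Int.floordiv (column_number - 1) 26 = (column_number - 1) / 26 :=
    PySem.Int.floordiv_eq_ediv_of_pos (by omega)
  have h2 : (column_number - 1) / 26 ≤ column_number - 1 := Int.ediv_le_self _ (by omega)
  have h3 : 0 ≤ (column_number - 1) / 26 := Int.ediv_nonneg (by omega) (by omega)
  rw [h1]; omega

def column_number_to_name (column_number : Int) : String :=
  if column_number ≤ 0 then ""   -- Python raises ValueError here; excluded by Pre_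
  else cnLoop column_number ""

-- ===== PORT B =====
def cnRec (column_number : Int) : String :=
  let q := PySem.Int.floordiv (column_number - 1) 26
  let r := PySem.Int.mod (column_number - 1) 26
  (if h : q > 0 then cnRec q else "") ++ String.ofList [Char.ofNat (65 + r).toNat]
termination_by column_number.toNat
decreasing_by
  have h2 : 26 * q ≤ column_number - 1 := by
    have := Int.ediv_add_emod (column_number - 1) 26
    have hm : 0 ≤ (column_number - 1) % 26 := Int.emod_nonneg _ (by omega)
    have hq : q = (column_number - 1) / 26 := PySem.Int.floordiv_eq_ediv_of_pos (by omega)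
    omega
  omega

def column_number_to_name_alt (column_number : Int) : String :=
  if column_number ≤ 0 then ""   -- B raises ValueError here; excluded by Pre_
  else cnRec column_number

-- ===== PRECONDITION & SPEC =====
-- Pre_ excludes column_number ≤ 0, where A raises ValueError (B raises the same ValueError).
def Pre_column_number_to_name (column_number : Int) : Prop := 0 < column_number
instance (column_number : Int) : Decidable (Pre_column_number_to_name column_number) := by
  unfold Pre_column_number_to_name; infer_instance
def pvWitness_column_number_to_name : Int := 28
def Spec_column_number_to_name (column_number : Int) (out : String) : Prop := out = column_number_to_name_alt column_number
instance (column_number : Int) (out : String) : Decidable (Spec_column_number_to_name column_number out) := by unfold Spec_column_number_to_name; infer_instance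

-- ===== CLAIM (what is proved, stated in full; the proofs are below) =====
def Claim_equal_column_number_to_name : Prop := ∀ (column_number : Int), Dom_column_number_to_name column_number → Pre_column_number_to_name column_number → Spec_column_number_to_name column_number (column_number_to_name column_number)

-- ===== LEMMAS AND PROOFS =====
theorem cnLoop_eq_cnRec_append (k : Nat) :
    ∀ (n : Int), n.toNat ≤ k → 0 < n → ∀ (acc : String),
      cnLoop n acc = cnRec n ++ acc := by
  induction k with
  | zero => intro n hk hn acc; omega
  | succ k ih =>
    intro n hk hn acc
    have hq : PySem.Int.floordiv (n - 1) 26 = (n - 1) / 26 :=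
      PySem.Int.floordiv_eq_ediv_of_pos (by omega)
    have hq0 : 0 ≤ (n - 1) / 26 := Int.ediv_nonneg (by omega) (by omega)
    have hqle : (n - 1) / 26 ≤ n - 1 := Int.ediv_le_self _ (by omega)
    rw [cnLoop, cnRec]
    simp only [hn, dite_true]
    by_cases hpos : (0:Int) < (n - 1) / 26
    · rw [ih _ (by rw [hq]; omega) (by rw [hq]; exact hpos)]
      simp only [hq, hpos, dite_true]
      apply String.ext_iff.mpr
      simp
    · have hz : PySem.Int.floordiv (n - 1) 26 = 0 := by rw [hq]; omega
      rw [hz, cnLoop]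
      simp only [hz] at *
      norm_num
      apply String.ext_iff.mpr
      simp

-- ===== VERDICT (by name: the statement is the Claim_ definition above) =====
theorem column_number_to_name_spec : Claim_equal_column_number_to_name := by
  intro n _ hpre
  unfold Spec_column_number_to_name column_number_to_name column_number_to_name_alt
  have hn : ¬ (n ≤ 0) := by exact not_le.mpr hpre
  simp only [hn, if_false]
  rw [cnLoop_eq_cnRec_append n.toNat n le_rfl hpre ""]
  simp
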